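-- pv_equiv track=rewrite | github.com/Vehmeyer/GCA-Problems | GCA.py | mutateTheArray
-- ===== SOURCE A (Python) =====
-- def mutateTheArray(n, a):
--     b = [0] * n
--
--     if n == 1:
--         b[0] = a[0]
--         return b
--
--     for i in range(len(a)):
--         if i == 0:
--             b[i] = 0 + a[i] + a[i + 1]
--         elif i != 0 and i != len(b) - 1:
--             b[i] = a[i - 1] + a[i] + a[i + 1]
--         else:
--             b[i] = a[i - 1] + a[i]
--
--     return b
-- ===== SOURCE B (Python) =====
-- def mutateTheArray(n, a):
--     b = [0] * n
--     if n == 1: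
--         b[0] = a[0]
--         return b
--     s = [0]
--     for x in a:
--         s.append(s[-1] + x)
--     for i in range(len(a)):
--         b[i] = s[min(i + 2, len(a))] - s[max(i - 1, 0)]
--     return b
-- ===== Notes on version B (the rewrite author's own statement) =====
-- stated objective: alternative
-- what changed: B replaces A's three-way positional branching by a cumulative-sums pass (s[k] = sum of a[:k]) followed by one uniform range-sum query s[min(i+2,len(a))] - s[max(i-1,0)] per index; A's n==1 early return is kept because it is observable behaviour.
import Mathlib
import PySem

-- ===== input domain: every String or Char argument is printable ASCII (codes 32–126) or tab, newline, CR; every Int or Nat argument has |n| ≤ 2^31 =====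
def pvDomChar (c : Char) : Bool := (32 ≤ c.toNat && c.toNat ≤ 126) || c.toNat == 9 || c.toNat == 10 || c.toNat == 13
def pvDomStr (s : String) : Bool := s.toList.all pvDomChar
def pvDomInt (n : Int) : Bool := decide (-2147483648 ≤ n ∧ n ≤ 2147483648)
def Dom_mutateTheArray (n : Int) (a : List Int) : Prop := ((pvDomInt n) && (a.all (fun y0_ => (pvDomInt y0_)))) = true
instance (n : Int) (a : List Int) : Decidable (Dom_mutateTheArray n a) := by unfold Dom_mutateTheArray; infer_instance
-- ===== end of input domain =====

-- B replaces A's three-way positional branching by a cumulative-sums pass and one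
-- uniform range-sum query per index (objective: alternative); A's n == 1 early
-- return is kept, as it is observable behaviour on mismatched-length calls.


-- ===== PORT A =====
-- literal port of A: b = [0]*n; special case n == 1; then the three-branch loop
-- over range(len(a)), with the middle branch reading len(b)-1 from the accumulator.
-- a[...] reads are ported with getD; inside Pre_ every read index is in range, so
-- getD is exact there (outside Pre_ the Python raises IndexError).
def mutateTheArray (n : Int) (a : List Int) : List Int :=
  let b := List.replicate n.toNat 0
  if n = 1 then
    b.set 0 (a.getD 0 0)
  else
    (List.range a.length).foldl
      (fun b i =>
        b.set i
          (if i = 0 then 0 + a.getD i 0 + a.getD (i + 1) 0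
           else if i ≠ 0 ∧ i ≠ b.length - 1 then
             a.getD (i - 1) 0 + a.getD i 0 + a.getD (i + 1) 0
           else a.getD (i - 1) 0 + a.getD i 0))
      b

-- ===== PORT B =====
-- literal port of B: b = [0]*n; if n == 1: b[0] = a[0]; return b; then
-- s = [0]; for x in a: s.append(s[-1] + x);
-- for i in range(len(a)): b[i] = s[min(i+2, len(a))] - s[max(i-1, 0)].
-- s is never empty, so Python's s[-1] is its last element (getLastD 0); the s[...]
-- read indices are clamped into [0, len(a)] and s has len(a)+1 entries, so getD is
-- exact there; b[i] = … is exact for i < n (inside Pre_ every loop index is).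
def mutateTheArray_alt (n : Int) (a : List Int) : List Int :=
  let b := List.replicate n.toNat 0
  if n = 1 then
    b.set 0 (a.getD 0 0)
  else
    let s := a.foldl (fun s x => s ++ [s.getLastD 0 + x]) [0]
    (List.range a.length).foldl
      (fun b i => b.set i (s.getD (min (i + 2) a.length) 0 - s.getD (max (i - 1) 0) 0))
      b

-- ===== PRECONDITION & SPEC =====
-- Pre_ excludes exactly the inputs on which A raises IndexError (n = 1 with a = [],
-- or a ≠ [] with len(a) ≠ n and n ≠ 1); it is A's full domain of normal return.
def Pre_mutateTheArray (n : Int) (a : List Int) : Prop :=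
  (a = [] ∧ n ≠ 1) ∨ (n = 1 ∧ a ≠ []) ∨ (1 ≤ n ∧ (a.length : Int) = n)
instance (n : Int) (a : List Int) : Decidable (Pre_mutateTheArray n a) := by
  unfold Pre_mutateTheArray; infer_instance
def pvWitness_mutateTheArray : Int × List Int := (3, [1, 2, 3])

def Spec_mutateTheArray (n : Int) (a : List Int) (out : List Int) : Prop := out = mutateTheArray_alt n a
instance (n : Int) (a : List Int) (out : List Int) : Decidable (Spec_mutateTheArray n a out) := by unfold Spec_mutateTheArray; infer_instance

-- ===== CLAIM (what is proved, stated in full; the proofs are below) =====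
def Claim_equal_mutateTheArray : Prop := ∀ (n : Int) (a : List Int), Dom_mutateTheArray n a → Pre_mutateTheArray n a → Spec_mutateTheArray n a (mutateTheArray n a)

-- ===== LEMMAS AND PROOFS =====

-- B's cumulative-sums list, named for the proofs
def pvS (a : List Int) : List Int := a.foldl (fun s x => s ++ [s.getLastD 0 + x]) [0]

theorem pvS_append_single (l : List Int) (x : Int) :
    pvS (l ++ [x]) = pvS l ++ [(pvS l).getLastD 0 + x] := by
  simp [pvS, List.foldl_append]

theorem pvS_length (a : List Int) : (pvS a).length = a.length + 1 := by
  induction a using List.reverseRecOn with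
  | nil => rfl
  | append_singleton l x ih => simp [pvS_append_single, ih]

theorem pvS_getD (a : List Int) : ∀ k ≤ a.length, (pvS a).getD k 0 = (a.take k).sum := by
  induction a using List.reverseRecOn with
  | nil =>
      intro k hk
      have hk0 : k = 0 := by simpa using hk
      subst hk0
      rfl
  | append_singleton l x ih =>
      intro k hk
      rw [pvS_append_single]
      by_cases hkl : k ≤ l.length
      · rw [List.getD, List.getElem?_append_left (by rw [pvS_length]; omega),
          ← List.getD, ih k hkl, List.take_append_of_le_length hkl]
      · have hk1 : k = l.length + 1 := by simp at hk; omega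
        subst hk1
        have hlast : (pvS l).getLastD 0 = (pvS l).getD l.length 0 := by
          rw [List.getLastD_eq_getLast?, List.getLast?_eq_getElem?, pvS_length,
            List.getD]
          simp
        rw [List.getD, List.getElem?_append_right (by simp [pvS_length]),
          pvS_length, show l.length + 1 - (l.length + 1) = 0 from by omega]
        show (pvS l).getLastD 0 + x = _
        rw [hlast, ih l.length le_rfl, List.take_length,
          List.take_of_length_le (show (l ++ [x]).length ≤ l.length + 1 by simp)]
        simp

theorem pvS_getD_succ (a : List Int) (m : Nat) (hm : m < a.length) :
    (pvS a).getD (m + 1) 0 = (pvS a).getD m 0 + a.getD m 0 := by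
  rw [pvS_getD a (m + 1) (by omega), pvS_getD a m (by omega),
    List.sum_take_succ _ _ hm, List.getD, List.getElem?_eq_getElem hm]
  rfl

-- the fold of index-sets preserves length
theorem pvFoldSetLen (g : List Int → Nat → Int) :
    ∀ (m : Nat) (b0 : List Int),
      ((List.range m).foldl (fun b i => b.set i (g b i)) b0).length = b0.length := by
  intro m
  induction m with
  | zero => intro b0; rfl
  | succ m ih =>
      intro b0
      simp [List.range_succ, List.foldl_append, ih]

-- a step function that only looks at the accumulator's length can be replaced
theorem pvFoldSetCongr (g : List Int → Nat → Int) (f : Nat → Int) (L : Nat)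
    (h : ∀ (b : List Int) (i : Nat), b.length = L → g b i = f i) :
    ∀ (m : Nat) (b0 : List Int), b0.length = L →
      (List.range m).foldl (fun b i => b.set i (g b i)) b0
        = (List.range m).foldl (fun b i => b.set i (f i)) b0 := by
  intro m
  induction m with
  | zero => intro b0 _; rfl
  | succ m ih =>
      intro b0 hb
      have hlen : ((List.range m).foldl (fun b i => b.set i (g b i)) b0).length = L := by
        rw [pvFoldSetLen]; exact hb
      simp only [List.range_succ, List.foldl_append, List.foldl_cons, List.foldl_nil]
      rw [ih b0 hb, ← ih b0 hb, h _ m hlen, ih b0 hb]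

-- characterisation of the fold's entries
theorem pvFoldSetGet (f : Nat → Int) :
    ∀ (m : Nat) (b0 : List Int) (j : Nat),
      ((List.range m).foldl (fun b i => b.set i (f i)) b0)[j]?
        = if j < m ∧ j < b0.length then some (f j) else b0[j]? := by
  intro m
  induction m with
  | zero => intro b0 j; simp
  | succ m ih =>
      intro b0 j
      have hlen : ((List.range m).foldl (fun b i => b.set i (f i)) b0).length = b0.length :=
        pvFoldSetLen (fun _ i => f i) m b0
      simp only [List.range_succ, List.foldl_append, List.foldl_cons, List.foldl_nil]
      rw [List.getElem?_set]
      by_cases hjm : j = m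
      · subst hjm
        by_cases hb : j < b0.length
        · simp [hlen, hb]
        · simp [hlen, hb]
      · have hmj : m ≠ j := fun h => hjm h.symm
        rcases Nat.lt_or_ge j m with h1 | h1
        · simp [hmj, ih, h1, Nat.lt_succ_of_lt h1]
        · have h0 : ¬ j < m := Nat.not_lt.mpr h1
          have h2 : ¬ j < m + 1 := by omega
          simp [hmj, ih, h0, h2]

-- ===== VERDICT (by name: the statement is the Claim_ definition above) =====
theorem mutateTheArray_spec : Claim_equal_mutateTheArray := by
  intro n a _ hpre
  show mutateTheArray n a = mutateTheArray_alt n a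
  by_cases hn : n = 1
  · -- n = 1: both sides take the early return
    unfold mutateTheArray mutateTheArray_alt
    rw [hn]
    rfl
  · unfold mutateTheArray mutateTheArray_alt
    rw [if_neg hn, if_neg hn]
    rcases hpre with ⟨rfl, -⟩ | ⟨h1, -⟩ | ⟨hn1, hlen⟩
    · -- a = []: both folds run over range 0 and return [0]*n
      rfl
    · exact absurd h1 hn
    · -- 1 ≤ n, n ≠ 1, len(a) = n  (so n ≥ 2): compare the folds entry by entry
      have hL : a.length = n.toNat := by omega
      have hn2 : 2 ≤ n := by omega
      rw [show (a.foldl (fun s x => s ++ [s.getLastD 0 + x]) [0]) = pvS a from rfl]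
      -- A's step only reads the accumulator's length; replace it by a pure index function
      set fA : Nat → Int := fun i =>
        if i = 0 then 0 + a.getD i 0 + a.getD (i + 1) 0
        else if i ≠ 0 ∧ i ≠ n.toNat - 1 then
          a.getD (i - 1) 0 + a.getD i 0 + a.getD (i + 1) 0
        else a.getD (i - 1) 0 + a.getD i 0 with hfA
      rw [pvFoldSetCongr
            (fun b i =>
              if i = 0 then 0 + a.getD i 0 + a.getD (i + 1) 0
              else if i ≠ 0 ∧ i ≠ b.length - 1 then
                a.getD (i - 1) 0 + a.getD i 0 + a.getD (i + 1) 0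
              else a.getD (i - 1) 0 + a.getD i 0)
            fA n.toNat
            (by intro b i hb; simp only [hfA, hb])
            a.length _ (by simp)]
      set fB : Nat → Int := fun i =>
        (pvS a).getD (min (i + 2) a.length) 0 - (pvS a).getD (max (i - 1) 0) 0 with hfB
      apply List.ext_getElem?
      intro j
      rw [pvFoldSetGet fA, pvFoldSetGet fB]
      by_cases hj : j < a.length ∧ j < (List.replicate n.toNat (0 : Int)).length
      · rw [if_pos hj, if_pos hj]
        have hjL : j < a.length := hj.1
        congr 1
        simp only [hfA, hfB]
        by_cases h0 : j = 0
        · subst h0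
          have hmin : min (0 + 2) a.length = 2 := by omega
          have hmax : max (0 - 1) 0 = 0 := by omega
          rw [if_pos rfl, hmin, hmax]
          rw [show (2 : Nat) = 1 + 1 from rfl,
            pvS_getD_succ a 1 (by omega), pvS_getD_succ a 0 (by omega),
            pvS_getD a 0 (by omega)]
          simp
        · rw [if_neg h0]
          obtain ⟨k, rfl⟩ : ∃ k, j = k + 1 := ⟨j - 1, by omega⟩
          have hmax : max (k + 1 - 1) 0 = k := by omega
          by_cases hl : k + 1 = n.toNat - 1
          · -- last index: the window is a[k] + a[k+1]
            rw [if_neg (by simp [hl])]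
            have hmin : min (k + 1 + 2) a.length = k + 2 := by omega
            rw [hmin, hmax, pvS_getD_succ a (k + 1) (by omega),
              pvS_getD_succ a k (by omega), show k + 1 - 1 = k from rfl]
            ring
          · -- middle index: the window is a[k] + a[k+1] + a[k+2]
            rw [if_pos ⟨h0, hl⟩]
            have hmin : min (k + 1 + 2) a.length = k + 3 := by omega
            rw [hmin, hmax, show k + 3 = k + 1 + 1 + 1 from rfl,
              pvS_getD_succ a (k + 1 + 1) (by omega),
              pvS_getD_succ a (k + 1) (by omega), pvS_getD_succ a k (by omega),
              show k + 1 - 1 = k from rfl]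
            ring
      · rw [if_neg hj, if_neg hj]
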